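-- pv_equiv track=rewrite | github.com/HuyNguyenAu/huynguyen | build.py | prepare_base
-- ===== SOURCE A (Python) =====
-- def prepare_base(base: str, index: bool) -> str:
--     links_post = {
--         ":home:": "../index.html",
--         ":resume:": "../base/resume.html",
--         ":about:": "./about.html",
--         ":css:": "../base/base.css",
--         ":js:": "../base/base.js",
--         ":apple_icon:": "../apple-touch-icon.png",
--         ":32_icon:": "../favicon-32x32.png",
--         ":16_icon:": "../favicon-16x16.png",
--         ":site_webmanifest:": "../site.webmanifest"
--     }
--     links_index = {
--         ":home:": "./index.html",
--         ":page:": "Home",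
--         ":resume:": "./base/resume.html",
--         ":about:": "./posts/about.html",
--         ":css:": "./base/base.css",
--         ":js:": "./base/base.js",
--         ":apple_icon:": "./apple-touch-icon.png",
--         ":32_icon:": "./favicon-32x32.png",
--         ":16_icon:": "./favicon-16x16.png",
--         ":site_webmanifest:": "./site.webmanifest"
--     }
--     links = links_post
--
--     if index:
--         links = links_index
--
--     for key in links:
--         base = base.replace(f"{key}", links[key])
--
--     return base
-- ===== SOURCE B (Python) =====
-- def prepare_base(base: str, index: bool) -> str:
--     # single source-of-truth table: name -> (post path or None, index path)
--     table = {
--         "home": ("../index.html", "./index.html"),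
--         "page": (None, "Home"),
--         "resume": ("../base/resume.html", "./base/resume.html"),
--         "about": ("./about.html", "./posts/about.html"),
--         "css": ("../base/base.css", "./base/base.css"),
--         "js": ("../base/base.js", "./base/base.js"),
--         "apple_icon": ("../apple-touch-icon.png", "./apple-touch-icon.png"),
--         "32_icon": ("../favicon-32x32.png", "./favicon-32x32.png"),
--         "16_icon": ("../favicon-16x16.png", "./favicon-16x16.png"),
--         "site_webmanifest": ("../site.webmanifest", "./site.webmanifest"),
--     }
--     items = []
--     for name, (post_v, idx_v) in table.items():
--         v = idx_v if index else post_v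
--         if v is not None:
--             items.append((f":{name}:", v))
--     out = []
--     i = 0
--     n = len(base)
--     while i < n:
--         for key, val in items:
--             if base.startswith(key, i):
--                 out.append(val)
--                 i += len(key)
--                 break
--         else:
--             out.append(base[i])
--             i += 1
--     return "".join(out)
-- ===== Notes on version B (the rewrite author's own statement) =====
-- stated objective: alternative
-- what changed: A keeps two hard-coded dicts and runs one full-string replace pass per placeholder key (9 or 10 passes); B keeps a single name->(post,index) table from which it derives the active key/value pairs and then makes one left-to-right scan over base, emitting the value of the first key matching at each position.
-- outside the precondition, e.g. on prepare_base(':32_icon:js:', False): A returns ':32_icon../base/base.js', B returns '../favicon-32x32.pngjs:'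
import Mathlib
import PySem

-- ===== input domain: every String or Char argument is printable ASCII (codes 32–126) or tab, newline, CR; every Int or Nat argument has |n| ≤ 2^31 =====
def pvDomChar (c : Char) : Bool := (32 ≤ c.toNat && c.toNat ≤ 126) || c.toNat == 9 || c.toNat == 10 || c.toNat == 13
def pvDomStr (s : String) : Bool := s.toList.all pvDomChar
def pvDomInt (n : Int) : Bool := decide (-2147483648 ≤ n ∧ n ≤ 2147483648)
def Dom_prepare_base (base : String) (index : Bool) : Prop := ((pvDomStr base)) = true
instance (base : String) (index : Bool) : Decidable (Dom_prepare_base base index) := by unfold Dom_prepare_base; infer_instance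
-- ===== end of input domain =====

-- B derives the active key/value pairs from a single name->(post,index) table and replaces A's
-- nine/ten sequential full-string `.replace` passes by one left-to-right matching scan
-- (alternative algorithm; return value only).


-- ===== PORT A =====
def pvLinksPost : PySem.Dict String String := PySem.Dict.ofList [
  (":home:", "../index.html"),
  (":resume:", "../base/resume.html"),
  (":about:", "./about.html"),
  (":css:", "../base/base.css"),
  (":js:", "../base/base.js"),
  (":apple_icon:", "../apple-touch-icon.png"),
  (":32_icon:", "../favicon-32x32.png"),
  (":16_icon:", "../favicon-16x16.png"),
  (":site_webmanifest:", "../site.webmanifest")]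

def pvLinksIndex : PySem.Dict String String := PySem.Dict.ofList [
  (":home:", "./index.html"),
  (":page:", "Home"),
  (":resume:", "./base/resume.html"),
  (":about:", "./posts/about.html"),
  (":css:", "./base/base.css"),
  (":js:", "./base/base.js"),
  (":apple_icon:", "./apple-touch-icon.png"),
  (":32_icon:", "./favicon-32x32.png"),
  (":16_icon:", "./favicon-16x16.png"),
  (":site_webmanifest:", "./site.webmanifest")]

-- for key in links: base = base.replace(key, links[key])
def prepare_base (base : String) (index : Bool) : String :=
  let links := if index then pvLinksIndex else pvLinksPost
  (PySem.Dict.keys links).foldl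
    (fun b key => PySem.Str.replace b key (PySem.Dict.getD links key "")) base

-- ===== PORT B =====
-- Source B's single table: name -> (post path or None, index path)
def pvTable : List (String × Option String × String) := [
  ("home", some "../index.html", "./index.html"),
  ("page", none, "Home"),
  ("resume", some "../base/resume.html", "./base/resume.html"),
  ("about", some "./about.html", "./posts/about.html"),
  ("css", some "../base/base.css", "./base/base.css"),
  ("js", some "../base/base.js", "./base/base.js"),
  ("apple_icon", some "../apple-touch-icon.png", "./apple-touch-icon.png"),
  ("32_icon", some "../favicon-32x32.png", "./favicon-32x32.png"),
  ("16_icon", some "../favicon-16x16.png", "./favicon-16x16.png"),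
  ("site_webmanifest", some "../site.webmanifest", "./site.webmanifest")]

-- the items-building loop of Source B: pick the side of the table, wrap the name in colons
def pvItems (index : Bool) : List (String × String) :=
  pvTable.filterMap (fun row =>
    (if index then some row.2.2 else row.2.1).map (fun v => (":" ++ row.1 ++ ":", v)))

-- the while loop of Source B: the position i becomes structural recursion on the remaining suffix of base
def pvScan (items : List (String × String)) : List Char → List Char
  | [] => []
  | c :: t =>
    match items.find? (fun kv => kv.1.toList.isPrefixOf (c :: t)) with
    | some kv => kv.2.toList ++ pvScan items (t.drop (kv.1.toList.length - 1))
    | none => c :: pvScan items t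
termination_by l => l.length
decreasing_by
  · simp only [List.length_cons]
    have := List.length_drop (l := t) (i := kv.1.toList.length - 1)
    omega
  · simp

def prepare_base_alt (base : String) (index : Bool) : String :=
  String.ofList (pvScan (pvItems index) base.toList)

-- ===== PRECONDITION & SPEC =====
def pvPostKeys : List (List Char) :=
  [":home:".toList, ":resume:".toList, ":about:".toList, ":css:".toList, ":js:".toList,
   ":apple_icon:".toList, ":32_icon:".toList, ":16_icon:".toList, ":site_webmanifest:".toList]
def pvIdxKeys : List (List Char) :=
  [":home:".toList, ":page:".toList, ":resume:".toList, ":about:".toList, ":css:".toList, ":js:".toList,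
   ":apple_icon:".toList, ":32_icon:".toList, ":16_icon:".toList, ":site_webmanifest:".toList]

-- Pre_ excludes strings in which two DIFFERENT placeholder tokens overlap on a shared ':' with the
-- later-in-dict token first (e.g. ":32_icon:js:"): there A's fixed per-key replacement order and B's
-- left-to-right scan are two equally defensible readings of an unspecified corner.
def Pre_prepare_base (base : String) (index : Bool) : Prop :=
  (if index then pvIdxKeys else pvPostKeys).Pairwise
    (fun a b => ¬ ((b.dropLast ++ a) <:+: base.toList))
instance (base : String) (index : Bool) : Decidable (Pre_prepare_base base index) := by
  unfold Pre_prepare_base; infer_instance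

def pvWitness_prepare_base : String × Bool := ("go :home: or read :about: now", false)

def Spec_prepare_base (base : String) (index : Bool) (out : String) : Prop := out = prepare_base_alt base index
instance (base : String) (index : Bool) (out : String) : Decidable (Spec_prepare_base base index out) := by
  unfold Spec_prepare_base; infer_instance

-- ===== CLAIM (what is proved, stated in full; the proofs are below) =====
def Claim_equal_prepare_base : Prop := ∀ (base : String) (index : Bool), Dom_prepare_base base index → Pre_prepare_base base index → Spec_prepare_base base index (prepare_base base index)

-- ===== LEMMAS AND PROOFS =====

-- the active pairs of each mode, as explicit lists (proof-side only)
def pvPairsPost : List (String × String) := [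
  (":home:", "../index.html"),
  (":resume:", "../base/resume.html"),
  (":about:", "./about.html"),
  (":css:", "../base/base.css"),
  (":js:", "../base/base.js"),
  (":apple_icon:", "../apple-touch-icon.png"),
  (":32_icon:", "../favicon-32x32.png"),
  (":16_icon:", "../favicon-16x16.png"),
  (":site_webmanifest:", "../site.webmanifest")]

def pvPairsIdx : List (String × String) := [
  (":home:", "./index.html"),
  (":page:", "Home"),
  (":resume:", "./base/resume.html"),
  (":about:", "./posts/about.html"),
  (":css:", "./base/base.css"),
  (":js:", "./base/base.js"),
  (":apple_icon:", "./apple-touch-icon.png"),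
  (":32_icon:", "./favicon-32x32.png"),
  (":16_icon:", "./favicon-16x16.png"),
  (":site_webmanifest:", "./site.webmanifest")]

theorem pvItems_false : pvItems false = pvPairsPost := by decide
theorem pvItems_true : pvItems true = pvPairsIdx := by decide

-- all characters occurring in any placeholder key of either dict
def pvKC : List Char := ['1','2','3','6',':','_','a','b','c','e','f','g','h','i','j','l','m','n','o','p','r','s','t','u','w']

def pvRep (s : List Char) (kv : List Char × List Char) : List Char := PySem.Chars.replace s kv.1 kv.2
def pvFold (K : List (List Char × List Char)) (s : List Char) : List Char := K.foldl pvRep s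

-- char-list mirror of pvScan
def pvCScan (K : List (List Char × List Char)) : List Char → List Char
  | [] => []
  | c :: t =>
    match K.find? (fun kv => kv.1.isPrefixOf (c :: t)) with
    | some kv => kv.2 ++ pvCScan K (t.drop (kv.1.length - 1))
    | none => c :: pvCScan K t
termination_by l => l.length
decreasing_by
  · simp only [List.length_cons]
    have := List.length_drop (l := t) (i := kv.1.length - 1)
    omega
  · simp

-- any KC-only prefix of Y is already a prefix of r
def pvRed (r Y : List Char) : Prop := ∀ w, w <+: Y → (∀ ch ∈ w, ch ∈ pvKC) → w <+: r

def pvGoodKV (kv : List Char × List Char) : Prop :=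
  2 ≤ kv.1.length ∧ kv.1.head? = some ':' ∧ kv.1.getLast? = some ':' ∧
  ((kv.1.drop 1).dropLast.all (fun c => c != ':')) = true ∧
  (kv.1.all (fun c => pvKC.contains c)) = true ∧
  kv.2 ≠ [] ∧ ((kv.2.take 1).all (fun ch => !pvKC.contains ch)) = true ∧
  (kv.2.all (fun c => c != ':')) = true

def pvGoodK (K : List (List Char × List Char)) : Prop :=
  (∀ kv ∈ K, pvGoodKV kv) ∧ K.Pairwise (fun a b => ¬ a.1 <+: b.1 ∧ ¬ b.1 <+: a.1)

def pvNC (K : List (List Char × List Char)) (s : List Char) : Prop :=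
  K.Pairwise (fun a b => ¬ ((b.1.dropLast ++ a.1) <:+: s))

theorem pvGoodKV_key_ne (kv : List Char × List Char) (h : pvGoodKV kv) : kv.1 ≠ [] := by
  have h1 := h.1
  intro hn
  rw [hn] at h1
  simp at h1

theorem pvGoodKV_interior (kv : List Char × List Char) (h : pvGoodKV kv) :
    ∀ c ∈ (kv.1.drop 1).dropLast, c ≠ ':' := by
  intro c hc
  simpa using List.all_eq_true.mp h.2.2.2.1 c hc

theorem pvGoodKV_keyKC (kv : List Char × List Char) (h : pvGoodKV kv) :
    ∀ c ∈ kv.1, c ∈ pvKC := by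
  intro c hc
  simpa using List.all_eq_true.mp h.2.2.2.2.1 c hc

theorem pvGoodKV_valHead (kv : List Char × List Char) (h : pvGoodKV kv) :
    ∀ ch ∈ kv.2.take 1, ch ∉ pvKC := by
  intro ch hc
  simpa using List.all_eq_true.mp h.2.2.2.2.2.2.1 ch hc

theorem pvGoodKV_valNoColon (kv : List Char × List Char) (h : pvGoodKV kv) :
    ∀ c ∈ kv.2, c ≠ ':' := by
  intro c hc
  simpa using List.all_eq_true.mp h.2.2.2.2.2.2.2 c hc

-- ---- basic equations for PySem.Chars.replace ----
theorem pvGo_zero (old new l acc : List Char) :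
    PySem.Chars.replace.go old new 0 l acc = acc.reverse ++ l := rfl

theorem pvGo_succ_nil (old new : List Char) (f : Nat) (acc : List Char) :
    PySem.Chars.replace.go old new (f + 1) [] acc = acc.reverse := rfl

theorem pvGo_succ_cons (old new : List Char) (f : Nat) (c : Char) (t acc : List Char) :
    PySem.Chars.replace.go old new (f + 1) (c :: t) acc =
      if old.isPrefixOf (c :: t) then
        PySem.Chars.replace.go old new f (List.drop old.length (c :: t)) (new.reverse ++ acc)
      else PySem.Chars.replace.go old new f t (c :: acc) := rfl

theorem pvGo_acc (old new : List Char) :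
    ∀ (f : Nat) (l acc : List Char),
      PySem.Chars.replace.go old new f l acc = acc.reverse ++ PySem.Chars.replace.go old new f l [] := by
  intro f
  induction f with
  | zero => intro l acc; rw [pvGo_zero, pvGo_zero]; simp
  | succ f ih =>
    intro l acc
    cases l with
    | nil => rw [pvGo_succ_nil, pvGo_succ_nil]; simp
    | cons c t =>
      rw [pvGo_succ_cons, pvGo_succ_cons]
      split
      · rw [ih _ (new.reverse ++ acc), ih _ (new.reverse ++ [])]; simp
      · rw [ih _ (c :: acc), ih _ [c]]; simp

theorem pvGo_fuel (old new : List Char) (hold : old ≠ []) :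
    ∀ (f1 f2 : Nat) (l acc : List Char), l.length ≤ f1 → l.length ≤ f2 →
      PySem.Chars.replace.go old new f1 l acc = PySem.Chars.replace.go old new f2 l acc := by
  have hop : 0 < old.length := List.length_pos_iff.mpr hold
  intro f1
  induction f1 with
  | zero =>
    intro f2 l acc h1 _
    have : l = [] := List.eq_nil_of_length_eq_zero (Nat.le_zero.mp h1)
    subst this
    cases f2 with
    | zero => rfl
    | succ f2 => rw [pvGo_zero, pvGo_succ_nil]; simp
  | succ f1 ih =>
    intro f2 l acc h1 h2
    cases l with
    | nil =>
      cases f2 with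
      | zero => rw [pvGo_zero, pvGo_succ_nil]; simp
      | succ f2 => rfl
    | cons c t =>
      cases f2 with
      | zero => simp at h2
      | succ f2 =>
        rw [pvGo_succ_cons, pvGo_succ_cons]
        split
        · apply ih
          · have := List.length_drop (l := c :: t) (i := old.length)
            simp only [List.length_cons] at h1 this ⊢
            omega
          · have := List.length_drop (l := c :: t) (i := old.length)
            simp only [List.length_cons] at h2 this ⊢
            omega
        · apply ih <;> simp only [List.length_cons] at h1 h2 ⊢ <;> omega

theorem pvRep_eq_go (old new s : List Char) (hold : old ≠ []) :
    PySem.Chars.replace s old new = PySem.Chars.replace.go old new s.length s [] := by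
  unfold PySem.Chars.replace
  rw [if_neg (by simpa [List.isEmpty_iff] using hold)]

theorem pvRep_nil (old new : List Char) (hold : old ≠ []) :
    PySem.Chars.replace [] old new = [] := by
  rw [pvRep_eq_go old new [] hold]
  rfl

theorem pvRep_cons (old new : List Char) (hold : old ≠ []) (c : Char) (t : List Char) :
    PySem.Chars.replace (c :: t) old new =
      if old.isPrefixOf (c :: t) then
        new ++ PySem.Chars.replace (t.drop (old.length - 1)) old new
      else c :: PySem.Chars.replace t old new := by
  have hop : 0 < old.length := List.length_pos_iff.mpr hold
  simp only [pvRep_eq_go _ _ _ hold, List.length_cons]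
  rw [pvGo_succ_cons]
  by_cases hp : old.isPrefixOf (c :: t) = true
  · rw [if_pos hp, if_pos hp, pvGo_acc]
    have hdrop : List.drop old.length (c :: t) = t.drop (old.length - 1) := by
      cases old with
      | nil => exact absurd rfl hold
      | cons o os => simp
    rw [hdrop, pvGo_fuel old new hold t.length (t.drop (old.length - 1)).length _ []
      (by have := List.length_drop (l := t) (i := old.length - 1); omega) (Nat.le_refl _)]
    simp
  · rw [if_neg hp, if_neg hp, pvGo_acc]
    simp

-- ---- a pvKC-only prefix of a replaced string was already a prefix before the replace ----
theorem pvRep_red (old new : List Char) (hold : old ≠ []) (hnew : new ≠ [])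
    (hnh : ∀ ch ∈ new.take 1, ch ∉ pvKC) :
    ∀ (t w : List Char), w <+: PySem.Chars.replace t old new → (∀ ch ∈ w, ch ∈ pvKC) → w <+: t := by
  intro t
  induction t with
  | nil =>
    intro w hw _
    rw [pvRep_nil old new hold] at hw
    exact hw
  | cons c t ih =>
    intro w hw hKC
    rw [pvRep_cons old new hold] at hw
    split at hw
    · cases w with
      | nil => exact List.nil_prefix
      | cons wh wt =>
        cases new with
        | nil => exact absurd rfl hnew
        | cons nh nt =>
          rw [List.cons_append, List.cons_prefix_cons] at hw
          have h1 : wh ∈ pvKC := hKC wh (List.mem_cons_self ..)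
          have h2 : nh ∉ pvKC := hnh nh (by simp)
          rw [hw.1] at h1
          exact absurd h1 h2
    · cases w with
      | nil => exact List.nil_prefix
      | cons wh wt =>
        rw [List.cons_prefix_cons] at hw ⊢
        exact ⟨hw.1, ih wt hw.2 (fun ch hch => hKC ch (List.mem_cons_of_mem _ hch))⟩

-- ---- replace passes over a region where no occurrence starts ----
theorem pvRep_pass (old new : List Char) (hold : old ≠ []) :
    ∀ (p r : List Char), (∀ j, j < p.length → ¬ old.isPrefixOf (List.drop j (p ++ r)) = true) →
      PySem.Chars.replace (p ++ r) old new = p ++ PySem.Chars.replace r old new := by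
  intro p
  induction p with
  | nil => intro r _; simp
  | cons c p ih =>
    intro r hnp
    rw [List.cons_append, pvRep_cons old new hold]
    rw [if_neg (by simpa using hnp 0 (by simp))]
    congr 1
    exact ih r (fun j hj => by simpa using hnp (j + 1) (by simpa using hj))

theorem pvFold_nil (K : List (List Char × List Char)) (hG : pvGoodK K) :
    ∀ (Kp : List (List Char × List Char)), (∀ kv ∈ Kp, kv ∈ K) → pvFold Kp [] = [] := by
  intro Kp
  induction Kp with
  | nil => intro _; rfl
  | cons kv Kp ih =>
    intro hsub
    have hkv := hG.1 kv (hsub kv (List.mem_cons_self ..))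
    simp only [pvFold, List.foldl_cons]
    rw [show pvRep [] kv = [] from pvRep_nil kv.1 kv.2 (pvGoodKV_key_ne kv hkv)]
    exact ih (fun x hx => hsub x (List.mem_cons_of_mem _ hx))

-- ---- fold leaves an unmatched head character alone ----
theorem pvFold_consKeep (K : List (List Char × List Char)) (hG : pvGoodK K) (c : Char) (t : List Char) :
    ∀ (Kp : List (List Char × List Char)), (∀ kv ∈ Kp, kv ∈ K) →
      (∀ kv ∈ Kp, ¬ kv.1 <+: (c :: t)) →
      ∀ (Y : List Char), pvRed t Y → pvFold Kp (c :: Y) = c :: pvFold Kp Y := by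
  intro Kp
  induction Kp with
  | nil => intro _ _ Y _; rfl
  | cons kv Kp ih =>
    intro hsub hnm Y hred
    have hkv := hG.1 kv (hsub kv (List.mem_cons_self ..))
    have hold : kv.1 ≠ [] := pvGoodKV_key_ne kv hkv
    have hm : ¬ kv.1 <+: (c :: Y) := by
      intro hpre
      cases hk1 : kv.1 with
      | nil => exact hold hk1
      | cons k0 ktl =>
        rw [hk1, List.cons_prefix_cons] at hpre
        have hktl : ktl <+: t := by
          apply hred ktl hpre.2
          intro ch hch
          exact pvGoodKV_keyKC kv hkv ch (by rw [hk1]; exact List.mem_cons_of_mem _ hch)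
        exact hnm kv (List.mem_cons_self ..) (by rw [hk1, List.cons_prefix_cons]; exact ⟨hpre.1, hktl⟩)
    have hstep : pvRep (c :: Y) kv = c :: pvRep Y kv := by
      unfold pvRep
      rw [pvRep_cons kv.1 kv.2 hold]
      rw [if_neg (by simpa [List.isPrefixOf_iff_prefix] using hm)]
    simp only [pvFold, List.foldl_cons]
    rw [hstep]
    exact ih (fun x hx => hsub x (List.mem_cons_of_mem _ hx))
      (fun x hx => hnm x (List.mem_cons_of_mem _ hx)) (pvRep Y kv)
      (fun w hw hKC => hred w (pvRep_red kv.1 kv.2 hold hkv.2.2.2.2.2.1 (pvGoodKV_valHead kv hkv) Y w hw hKC) hKC)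

-- ---- fold by non-matching other keys leaves the head token alone ----
theorem pvFold_tokenKeep (K : List (List Char × List Char)) (hG : pvGoodK K)
    (kmid : List Char) (hmid : ∀ ch ∈ kmid, ch ≠ ':') (r : List Char) :
    ∀ (Kp : List (List Char × List Char)),
      (∀ kv ∈ Kp, kv ∈ K ∧ ¬ kv.1 <+: ((':' :: kmid ++ [':']) ++ r) ∧
        ¬ (':' :: kmid ++ [':']) <+: kv.1 ∧
        ¬ (((':' :: kmid ++ [':']).dropLast ++ kv.1) <:+: ((':' :: kmid ++ [':']) ++ r))) →
      ∀ (Y : List Char), pvRed r Y →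
        pvFold Kp ((':' :: kmid ++ [':']) ++ Y) = (':' :: kmid ++ [':']) ++ pvFold Kp Y := by
  intro Kp
  induction Kp with
  | nil => intro _ Y _; rfl
  | cons kv Kp ih =>
    intro hyp Y hred
    obtain ⟨hkvK, hnp, hknp, hnc⟩ := hyp kv (List.mem_cons_self ..)
    have hkv := hG.1 kv hkvK
    have hold : kv.1 ≠ [] := pvGoodKV_key_ne kv hkv
    set k : List Char := ':' :: kmid ++ [':'] with hkdef
    obtain ⟨kvtl, hkv1⟩ : ∃ tl, kv.1 = ':' :: tl := by
      cases h : kv.1 with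
      | nil => exact absurd h hold
      | cons a tl =>
        have h2 := hkv.2.1
        rw [h] at h2
        simp at h2
        exact ⟨tl, by rw [h2]⟩
    have hklen : k.length = kmid.length + 2 := by simp [hkdef]
    have hcond : ∀ j, j < k.length → ¬ kv.1.isPrefixOf (List.drop j (k ++ Y)) = true := by
      intro j hj hpb
      have hpre : kv.1 <+: List.drop j (k ++ Y) := List.isPrefixOf_iff_prefix.mp hpb
      rcases Nat.eq_or_lt_of_le (Nat.zero_le j) with hj0 | hjpos
      · -- j = 0
        rw [← hj0, List.drop_zero] at hpre
        by_cases hlen : kv.1.length ≤ k.length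
        · have hk : kv.1 <+: k := by
            have h1 : kv.1 = (k ++ Y).take kv.1.length := List.prefix_iff_eq_take.mp hpre
            rw [List.take_append_of_le_length hlen] at h1
            rw [h1]
            exact List.take_prefix _ _
          exact hnp (hk.trans (List.prefix_append k r))
        · rcases List.prefix_or_prefix_of_prefix hpre (List.prefix_append k Y) with h | h
          · exact hlen h.length_le
          · exact hknp h
      · by_cases hjl : j = kmid.length + 1
        · -- the token's final colon
          have hdrop : List.drop j (k ++ Y) = ':' :: Y := by
            rw [List.drop_append_of_le_length (by omega), hjl, hkdef]
            show List.drop (kmid.length + 1) (':' :: (kmid ++ [':'])) ++ Y = ':' :: Y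
            rw [List.drop_succ_cons, List.drop_left]
            rfl
          rw [hdrop, hkv1, List.cons_prefix_cons] at hpre
          have hktl : kvtl <+: r := by
            apply hred kvtl hpre.2
            intro ch hch
            exact pvGoodKV_keyKC kv hkv ch (by rw [hkv1]; exact List.mem_cons_of_mem _ hch)
          apply hnc
          have hdl : k.dropLast = ':' :: kmid := by
            rw [hkdef]
            rw [show ':' :: kmid ++ [':'] = (':' :: kmid) ++ [':'] from by simp]
            rw [List.dropLast_concat]
          have hkr : k ++ r = (':' :: kmid) ++ (':' :: r) := by rw [hkdef]; simp
          rw [hdl, hkv1, hkr]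
          apply List.IsPrefix.isInfix
          obtain ⟨u, hu⟩ := hktl
          exact ⟨u, by simp [← hu]⟩
        · -- inside the token interior
          have hj1 : j - 1 < kmid.length := by omega
          have hhd : (List.drop j (k ++ Y)).head? = some (kmid[j - 1]'hj1) := by
            rw [List.head?_drop]
            rw [List.getElem?_append_left (by omega)]
            rw [hkdef]
            have hx : (':' :: (kmid ++ [':']))[j]? = (kmid ++ [':'])[j - 1]? := by
              cases j with
              | zero => omega
              | succ j' => simp
            simp only [List.cons_append] at hx ⊢
            rw [hx, List.getElem?_append_left hj1, List.getElem?_eq_getElem hj1]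
          have hcol : (List.drop j (k ++ Y)).head? = some ':' := by
            rw [hkv1] at hpre
            obtain ⟨u, hu⟩ := hpre
            rw [← hu]
            simp
          rw [hcol] at hhd
          exact hmid _ (List.getElem_mem _) (by injection hhd with h; exact h.symm)
    have hstep : pvRep (k ++ Y) kv = k ++ pvRep Y kv := pvRep_pass kv.1 kv.2 hold k Y hcond
    simp only [pvFold, List.foldl_cons]
    rw [show pvRep (k ++ Y) kv = k ++ pvRep Y kv from hstep]
    exact ih (fun x hx => hyp x (List.mem_cons_of_mem _ hx)) (pvRep Y kv)
      (fun w hw hKC => hred w (pvRep_red kv.1 kv.2 hold hkv.2.2.2.2.2.1 (pvGoodKV_valHead kv hkv) Y w hw hKC) hKC)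

-- ---- fold passes over an inserted (colon-free) value ----
theorem pvFold_valPass (K : List (List Char × List Char)) (hG : pvGoodK K)
    (v : List Char) (hv : ∀ ch ∈ v, ch ≠ ':') :
    ∀ (Kp : List (List Char × List Char)), (∀ kv ∈ Kp, kv ∈ K) →
      ∀ (X : List Char), pvFold Kp (v ++ X) = v ++ pvFold Kp X := by
  intro Kp
  induction Kp with
  | nil => intro _ X; rfl
  | cons kv Kp ih =>
    intro hsub X
    have hkv := hG.1 kv (hsub kv (List.mem_cons_self ..))
    have hold : kv.1 ≠ [] := pvGoodKV_key_ne kv hkv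
    have hcond : ∀ j, j < v.length → ¬ kv.1.isPrefixOf (List.drop j (v ++ X)) = true := by
      intro j hj hpb
      have hpre := List.isPrefixOf_iff_prefix.mp hpb
      obtain ⟨kvtl, hkv1⟩ : ∃ tl, kv.1 = ':' :: tl := by
        cases h : kv.1 with
        | nil => exact absurd h hold
        | cons a tl =>
          have h2 := hkv.2.1
          rw [h] at h2
          simp at h2
          exact ⟨tl, by rw [h2]⟩
      have hhd : (List.drop j (v ++ X)).head? = some (v[j]'hj) := by
        rw [List.head?_drop, List.getElem?_append_left hj, List.getElem?_eq_getElem hj]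
      have hcol : (List.drop j (v ++ X)).head? = some ':' := by
        rw [hkv1] at hpre
        obtain ⟨u, hu⟩ := hpre
        rw [← hu]
        simp
      rw [hcol] at hhd
      exact hv _ (List.getElem_mem _) (by injection hhd with h; exact h.symm)
    simp only [pvFold, List.foldl_cons]
    rw [show pvRep (v ++ X) kv = v ++ pvRep X kv from pvRep_pass kv.1 kv.2 hold v X hcond]
    exact ih (fun x hx => hsub x (List.mem_cons_of_mem _ hx)) (pvRep X kv)

theorem pvNC_mono (K : List (List Char × List Char)) (s u : List Char)
    (h : pvNC K s) (hu : u <:+: s) : pvNC K u :=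
  h.imp (fun hr hc => hr (hc.trans hu))

-- replacing a token at the head of the string
theorem pvRep_self_prefix (old new : List Char) (hold : old ≠ []) (Z : List Char) :
    PySem.Chars.replace (old ++ Z) old new = new ++ PySem.Chars.replace Z old new := by
  cases old with
  | nil => exact absurd rfl hold
  | cons o os =>
    rw [List.cons_append, pvRep_cons _ _ hold,
      if_pos (List.isPrefixOf_iff_prefix.mpr ⟨Z, by simp⟩)]
    try simp

-- token shape: a key is ':' :: interior ++ [':']
theorem pvKeyShape (l : List Char) (h2 : 2 ≤ l.length) (hh : l.head? = some ':')
    (hl : l.getLast? = some ':') : l = ':' :: (l.drop 1).dropLast ++ [':'] := by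
  cases l with
  | nil => simp at h2
  | cons a tl =>
    have ha : a = ':' := by simpa using hh
    subst ha
    have htl : tl ≠ [] := by
      intro h
      rw [h] at h2
      simp at h2
    have hx : tl.dropLast ++ [tl.getLast htl] = tl := List.dropLast_append_getLast htl
    have hy : tl.getLast htl = ':' := by
      have h12 : (':' :: tl).getLast? = tl.getLast? := by
        cases tl with
        | nil => exact absurd rfl htl
        | cons b tb => simp
      rw [h12, List.getLast?_eq_some_getLast htl] at hl
      exact Option.some.inj hl
    conv_lhs => rw [← hx, hy]
    simp

-- one-step equations for the scans
theorem pvCScan_nil (K : List (List Char × List Char)) : pvCScan K [] = [] := by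
  rw [pvCScan]

theorem pvCScan_cons_none (K : List (List Char × List Char)) (c : Char) (t : List Char)
    (h : K.find? (fun kv => kv.1.isPrefixOf (c :: t)) = none) :
    pvCScan K (c :: t) = c :: pvCScan K t := by
  rw [pvCScan, h]

theorem pvCScan_cons_some (K : List (List Char × List Char)) (c : Char) (t : List Char)
    (kv : List Char × List Char)
    (h : K.find? (fun kv => kv.1.isPrefixOf (c :: t)) = some kv) :
    pvCScan K (c :: t) = kv.2 ++ pvCScan K (t.drop (kv.1.length - 1)) := by
  rw [pvCScan, h]

theorem pvScan_nil (items : List (String × String)) : pvScan items [] = [] := by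
  rw [pvScan]

theorem pvScan_cons_none (items : List (String × String)) (c : Char) (t : List Char)
    (h : items.find? (fun kv => kv.1.toList.isPrefixOf (c :: t)) = none) :
    pvScan items (c :: t) = c :: pvScan items t := by
  rw [pvScan, h]

theorem pvScan_cons_some (items : List (String × String)) (c : Char) (t : List Char)
    (kv : String × String)
    (h : items.find? (fun kv => kv.1.toList.isPrefixOf (c :: t)) = some kv) :
    pvScan items (c :: t) = kv.2.toList ++ pvScan items (t.drop (kv.1.toList.length - 1)) := by
  rw [pvScan, h]

-- ---- main generic theorem: sequential replaces = one-pass scan ----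
theorem pvMain (K : List (List Char × List Char)) (hG : pvGoodK K) :
    ∀ (n : Nat) (s : List Char), s.length ≤ n → pvNC K s → pvFold K s = pvCScan K s := by
  intro n
  induction n with
  | zero =>
    intro s hl _
    have : s = [] := List.eq_nil_of_length_eq_zero (Nat.le_zero.mp hl)
    subst this
    rw [pvFold_nil K hG K (fun _ h => h), pvCScan_nil]
  | succ n ih =>
    intro s hl hNC
    cases s with
    | nil =>
      rw [pvFold_nil K hG K (fun _ h => h), pvCScan_nil]
    | cons c t =>
      cases hfind : K.find? (fun kv => kv.1.isPrefixOf (c :: t)) with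
      | none =>
        have hn : ∀ kv ∈ K, ¬ kv.1 <+: (c :: t) := by
          intro kv hkv hp
          have hb := List.find?_eq_none.mp hfind kv hkv
          rw [List.isPrefixOf_iff_prefix] at hb
          exact hb hp
        rw [pvFold_consKeep K hG c t K (fun _ h => h) hn t (fun w hw _ => hw),
          pvCScan_cons_none K c t hfind]
        congr 1
        have hlt : t.length ≤ n := by simp only [List.length_cons] at hl; omega
        exact ih t hlt (pvNC_mono K (c :: t) t hNC (List.suffix_cons c t).isInfix)
      | some kv =>
        obtain ⟨hpkv, K1, K2, hKeq, hK1⟩ := List.find?_eq_some_iff_append.mp hfind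
        have hkvK : kv ∈ K := by rw [hKeq]; exact List.mem_append_right _ (List.mem_cons_self ..)
        have hkv := hG.1 kv hkvK
        have hold : kv.1 ≠ [] := pvGoodKV_key_ne kv hkv
        have hpre : kv.1 <+: (c :: t) := List.isPrefixOf_iff_prefix.mp hpkv
        set kmid : List Char := (kv.1.drop 1).dropLast with hkmid
        have hshape : kv.1 = ':' :: kmid ++ [':'] := pvKeyShape kv.1 hkv.1 hkv.2.1 hkv.2.2.1
        have hmid : ∀ ch ∈ kmid, ch ≠ ':' := pvGoodKV_interior kv hkv
        obtain ⟨r, hr⟩ := hpre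
        have hct : c :: t = kv.1 ++ r := hr.symm
        have hdropr : t.drop (kv.1.length - 1) = r := by
          have hct' : c :: t = ':' :: ((kmid ++ [':']) ++ r) := by rw [hct, hshape]; simp
          have htr : t = (kmid ++ [':']) ++ r := by injection hct'
          have hlen1 : kv.1.length - 1 = (kmid ++ [':']).length := by rw [hshape]; simp
          rw [htr, hlen1, List.drop_left]
        have hhyps : ∀ x ∈ K1, x ∈ K ∧ ¬ x.1 <+: ((':' :: kmid ++ [':']) ++ r) ∧
            ¬ (':' :: kmid ++ [':']) <+: x.1 ∧
            ¬ (((':' :: kmid ++ [':']).dropLast ++ x.1) <:+: ((':' :: kmid ++ [':']) ++ r)) := by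
          intro x hx
          have hxK : x ∈ K := by rw [hKeq]; exact List.mem_append_left _ hx
          refine ⟨hxK, ?_, ?_, ?_⟩
          · rw [← hshape, ← hct]
            intro hp
            have hb := hK1 x hx
            rw [List.isPrefixOf_iff_prefix.mpr hp] at hb
            simp at hb
          · rw [← hshape]
            have hpw := hG.2
            rw [hKeq] at hpw
            exact ((List.pairwise_append.mp hpw).2.2 x hx kv (List.mem_cons_self ..)).2
          · rw [← hshape, ← hct]
            have hpw := hNC
            unfold pvNC at hpw
            rw [hKeq] at hpw
            exact (List.pairwise_append.mp hpw).2.2 x hx kv (List.mem_cons_self ..)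
        have e1 : pvFold K1 (kv.1 ++ r) = kv.1 ++ pvFold K1 r := by
          have h := pvFold_tokenKeep K hG kmid hmid r K1 hhyps r (fun w hw _ => hw)
          rw [← hshape] at h
          exact h
        have hfold : pvFold K (c :: t) = kv.2 ++ pvFold K r := by
          calc pvFold K (c :: t)
              = pvFold K2 (pvRep (pvFold K1 (kv.1 ++ r)) kv) := by
                rw [hct, hKeq]; simp [pvFold, List.foldl_append]
            _ = pvFold K2 (kv.2 ++ pvRep (pvFold K1 r) kv) := by
                rw [e1]
                show pvFold K2 (pvRep (kv.1 ++ pvFold K1 r) kv) = _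
                rw [show pvRep (kv.1 ++ pvFold K1 r) kv = kv.2 ++ pvRep (pvFold K1 r) kv from
                  pvRep_self_prefix kv.1 kv.2 hold (pvFold K1 r)]
            _ = kv.2 ++ pvFold K2 (pvRep (pvFold K1 r) kv) :=
                pvFold_valPass K hG kv.2 (pvGoodKV_valNoColon kv hkv) K2
                  (fun x hx => by rw [hKeq]; exact List.mem_append_right _ (List.mem_cons_of_mem _ hx))
                  (pvRep (pvFold K1 r) kv)
            _ = kv.2 ++ pvFold K r := by
                rw [hKeq]; simp [pvFold, List.foldl_append]
        have hrlen : r.length ≤ n := by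
          have h1 : (c :: t).length = kv.1.length + r.length := by rw [hct]; simp
          have h2 : 2 ≤ kv.1.length := hkv.1
          simp only [List.length_cons] at h1 hl
          omega
        have hNCr : pvNC K r := pvNC_mono K (c :: t) r hNC
          (by rw [hct]; exact (List.suffix_append kv.1 r).isInfix)
        rw [hfold, ih r hrlen hNCr, pvCScan_cons_some K c t kv hfind, hdropr]

-- bridge: pvScan over String pairs = pvCScan over their char lists
theorem pvScan_eq (items : List (String × String)) :
    ∀ (n : Nat) (l : List Char), l.length ≤ n →
      pvScan items l = pvCScan (items.map (fun kv => (kv.1.toList, kv.2.toList))) l := by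
  intro n
  induction n with
  | zero =>
    intro l hl
    have : l = [] := List.eq_nil_of_length_eq_zero (Nat.le_zero.mp hl)
    subst this
    rw [pvScan_nil, pvCScan_nil]
  | succ n ih =>
    intro l hl
    cases l with
    | nil => rw [pvScan_nil, pvCScan_nil]
    | cons c t =>
      have hcomp : ((fun (kv : List Char × List Char) => kv.1.isPrefixOf (c :: t)) ∘
          (fun (kv : String × String) => (kv.1.toList, kv.2.toList))) =
          (fun (kv : String × String) => kv.1.toList.isPrefixOf (c :: t)) := rfl
      cases hfind : items.find? (fun kv => kv.1.toList.isPrefixOf (c :: t)) with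
      | none =>
        have hfm : (items.map (fun kv => (kv.1.toList, kv.2.toList))).find?
            (fun kv => kv.1.isPrefixOf (c :: t)) = none := by
          rw [List.find?_map, hcomp, hfind]
          rfl
        rw [pvScan_cons_none items c t hfind,
          pvCScan_cons_none _ c t hfm]
        congr 1
        exact ih t (by simp only [List.length_cons] at hl; omega)
      | some kv =>
        have hfm : (items.map (fun kv => (kv.1.toList, kv.2.toList))).find?
            (fun kv => kv.1.isPrefixOf (c :: t)) = some (kv.1.toList, kv.2.toList) := by
          rw [List.find?_map, hcomp, hfind]
          rfl
        rw [pvScan_cons_some items c t kv hfind,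
          pvCScan_cons_some _ c t (kv.1.toList, kv.2.toList) hfm]
        congr 1
        apply ih
        have := List.length_drop (l := t) (i := kv.1.toList.length - 1)
        simp only [List.length_cons] at hl
        omega

-- literal char-pair tables of the two modes
def pvKPost : List (List Char × List Char) :=
  pvPairsPost.map (fun kv => (kv.1.toList, kv.2.toList))
def pvKIdx : List (List Char × List Char) :=
  pvPairsIdx.map (fun kv => (kv.1.toList, kv.2.toList))

set_option maxRecDepth 8192 in
theorem pvGoodKPost : pvGoodK pvKPost := by
  constructor
  · intro kv hkv
    simp only [pvKPost, pvPairsPost, List.map_cons, List.map_nil, List.mem_cons,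
      List.not_mem_nil, or_false] at hkv
    unfold pvGoodKV
    rcases hkv with rfl | rfl | rfl | rfl | rfl | rfl | rfl | rfl | rfl <;>
      exact ⟨by decide, by decide, by decide, by decide, by decide, by decide, by decide, by decide⟩
  · decide

set_option maxRecDepth 8192 in
theorem pvGoodKIdx : pvGoodK pvKIdx := by
  constructor
  · intro kv hkv
    simp only [pvKIdx, pvPairsIdx, List.map_cons, List.map_nil, List.mem_cons,
      List.not_mem_nil, or_false] at hkv
    unfold pvGoodKV
    rcases hkv with rfl | rfl | rfl | rfl | rfl | rfl | rfl | rfl | rfl | rfl <;>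
      exact ⟨by decide, by decide, by decide, by decide, by decide, by decide, by decide, by decide⟩
  · decide

-- port A unfolds to pvFold over the literal table
theorem pvA_post (base : String) : (prepare_base base false).toList = pvFold pvKPost base.toList := by
  have hk : PySem.Dict.keys pvLinksPost = [":home:", ":resume:", ":about:", ":css:", ":js:",
      ":apple_icon:", ":32_icon:", ":16_icon:", ":site_webmanifest:"] := by decide
  have g1 : PySem.Dict.getD pvLinksPost ":home:" "" = "../index.html" := by decide
  have g2 : PySem.Dict.getD pvLinksPost ":resume:" "" = "../base/resume.html" := by decide
  have g3 : PySem.Dict.getD pvLinksPost ":about:" "" = "./about.html" := by decide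
  have g4 : PySem.Dict.getD pvLinksPost ":css:" "" = "../base/base.css" := by decide
  have g5 : PySem.Dict.getD pvLinksPost ":js:" "" = "../base/base.js" := by decide
  have g6 : PySem.Dict.getD pvLinksPost ":apple_icon:" "" = "../apple-touch-icon.png" := by decide
  have g7 : PySem.Dict.getD pvLinksPost ":32_icon:" "" = "../favicon-32x32.png" := by decide
  have g8 : PySem.Dict.getD pvLinksPost ":16_icon:" "" = "../favicon-16x16.png" := by decide
  have g9 : PySem.Dict.getD pvLinksPost ":site_webmanifest:" "" = "../site.webmanifest" := by decide
  show ((PySem.Dict.keys pvLinksPost).foldl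
    (fun b key => PySem.Str.replace b key (PySem.Dict.getD pvLinksPost key "")) base).toList = _
  rw [hk]
  simp only [List.foldl_cons, List.foldl_nil, g1, g2, g3, g4, g5, g6, g7, g8, g9]
  simp only [pvFold, pvKPost, pvPairsPost, List.map_cons, List.map_nil, List.foldl_cons,
    List.foldl_nil, pvRep, PySem.Str.toList_replace]

theorem pvA_idx (base : String) : (prepare_base base true).toList = pvFold pvKIdx base.toList := by
  have hk : PySem.Dict.keys pvLinksIndex = [":home:", ":page:", ":resume:", ":about:", ":css:",
      ":js:", ":apple_icon:", ":32_icon:", ":16_icon:", ":site_webmanifest:"] := by decide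
  have g1 : PySem.Dict.getD pvLinksIndex ":home:" "" = "./index.html" := by decide
  have g2 : PySem.Dict.getD pvLinksIndex ":page:" "" = "Home" := by decide
  have g3 : PySem.Dict.getD pvLinksIndex ":resume:" "" = "./base/resume.html" := by decide
  have g4 : PySem.Dict.getD pvLinksIndex ":about:" "" = "./posts/about.html" := by decide
  have g5 : PySem.Dict.getD pvLinksIndex ":css:" "" = "./base/base.css" := by decide
  have g6 : PySem.Dict.getD pvLinksIndex ":js:" "" = "./base/base.js" := by decide
  have g7 : PySem.Dict.getD pvLinksIndex ":apple_icon:" "" = "./apple-touch-icon.png" := by decide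
  have g8 : PySem.Dict.getD pvLinksIndex ":32_icon:" "" = "./favicon-32x32.png" := by decide
  have g9 : PySem.Dict.getD pvLinksIndex ":16_icon:" "" = "./favicon-16x16.png" := by decide
  have g10 : PySem.Dict.getD pvLinksIndex ":site_webmanifest:" "" = "./site.webmanifest" := by decide
  show ((PySem.Dict.keys pvLinksIndex).foldl
    (fun b key => PySem.Str.replace b key (PySem.Dict.getD pvLinksIndex key "")) base).toList = _
  rw [hk]
  simp only [List.foldl_cons, List.foldl_nil, g1, g2, g3, g4, g5, g6, g7, g8, g9, g10]
  simp only [pvFold, pvKIdx, pvPairsIdx, List.map_cons, List.map_nil, List.foldl_cons,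
    List.foldl_nil, pvRep, PySem.Str.toList_replace]

-- ===== VERDICT (by name: the statement is the Claim_ definition above) =====
theorem prepare_base_spec : Claim_equal_prepare_base := by
  intro base index _hdom hpre
  unfold Spec_prepare_base
  apply String.toList_inj.mp
  cases index with
  | false =>
    have hp2 : List.Pairwise (fun a b => ¬ ((b.dropLast ++ a) <:+: base.toList)) pvPostKeys := hpre
    have hkeys : pvPostKeys = pvKPost.map (·.1) := by decide
    rw [hkeys] at hp2
    have hNC : pvNC pvKPost base.toList := List.pairwise_map.mp hp2
    rw [pvA_post, pvMain pvKPost pvGoodKPost base.toList.length base.toList (Nat.le_refl _) hNC]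
    have halt : (prepare_base_alt base false).toList = pvScan pvPairsPost base.toList := by
      simp [prepare_base_alt, pvItems_false]
    rw [halt, pvScan_eq pvPairsPost base.toList.length base.toList (Nat.le_refl _)]
    rfl
  | true =>
    have hp2 : List.Pairwise (fun a b => ¬ ((b.dropLast ++ a) <:+: base.toList)) pvIdxKeys := hpre
    have hkeys : pvIdxKeys = pvKIdx.map (·.1) := by decide
    rw [hkeys] at hp2
    have hNC : pvNC pvKIdx base.toList := List.pairwise_map.mp hp2
    rw [pvA_idx, pvMain pvKIdx pvGoodKIdx base.toList.length base.toList (Nat.le_refl _) hNC]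
    have halt : (prepare_base_alt base true).toList = pvScan pvPairsIdx base.toList := by
      simp [prepare_base_alt, pvItems_true]
    rw [halt, pvScan_eq pvPairsIdx base.toList.length base.toList (Nat.le_refl _)]
    rfl
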